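-- pv_equiv track=rewrite | github.com/lan496/dsenum | src/dsenum/derivative_structure.py | prepare_poscar_string
-- ===== SOURCE A (Python) =====
-- from typing import List, Union
--
-- def prepare_poscar_string(
--     head_lines: List[str], list_species: List[str], list_coords_str: List[str]
-- ) -> str:
--     # ref: https://www.vasp.at/wiki/index.php/POSCAR
--     lines = head_lines
--
--     # species
--     # TODO: this part is dominant in runtime
--     counter = []
--     element = ""
--     count = 0
--     for species_str in list_species:
--         if element == "":
--             element = species_str
--             count += 1
--         elif species_str == element:
--             count += 1
--         else:
--             counter.append((element, count))
--             element = species_str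
--             count = 1
--     if element != "":
--         counter.append((element, count))
--     lines.append(" ".join([e for e, _ in counter]))
--     lines.append(" ".join([str(c) for _, c in counter]))
--
--     # fractional coords
--     lines.append("Direct")
--     lines.extend(list_coords_str)
--
--     poscar_str = "\n".join(lines)
--     return poscar_str
-- ===== SOURCE B (Python) =====
-- def _merge(left, right):
--     (y, c), (z, d) = left[-1], right[0]
--     if y == z:
--         return left[:-1] + [(y, c + d)] + right[1:]
--     return left + right
--
--
-- def _rle(seg):
--     if len(seg) <= 1:
--         return [(s, 1) for s in seg]
--     mid = len(seg) // 2
--     return _merge(_rle(seg[:mid]), _rle(seg[mid:]))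
--
--
-- def prepare_poscar_string(head_lines, list_species, list_coords_str):
--     # Divide-and-conquer run-length encoding: encode each half, merge at the boundary.
--     counter = _rle(list_species)
--     head_lines.append(" ".join(e for e, _ in counter))
--     head_lines.append(" ".join(str(c) for _, c in counter))
--     head_lines.append("Direct")
--     head_lines.extend(list_coords_str)
--     return "\n".join(head_lines)
-- ===== Notes on version B (the rewrite author's own statement) =====
-- stated objective: alternative
-- what changed: Replaces A's left-to-right element/count state-machine loop (with an empty-string sentinel and post-loop flush) by a divide-and-conquer run-length encoding that encodes each half recursively and merges equal runs at the boundary.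
-- outside the precondition, e.g. on prepare_poscar_string([], [''], []): A returns '\n\nDirect', B returns '\n1\nDirect'; on prepare_poscar_string(['h'], ['a', '', 'a'], []): A returns 'h\na a\n1 2\nDirect', B returns 'h\na  a\n1 1 1\nDirect'
import Mathlib
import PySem

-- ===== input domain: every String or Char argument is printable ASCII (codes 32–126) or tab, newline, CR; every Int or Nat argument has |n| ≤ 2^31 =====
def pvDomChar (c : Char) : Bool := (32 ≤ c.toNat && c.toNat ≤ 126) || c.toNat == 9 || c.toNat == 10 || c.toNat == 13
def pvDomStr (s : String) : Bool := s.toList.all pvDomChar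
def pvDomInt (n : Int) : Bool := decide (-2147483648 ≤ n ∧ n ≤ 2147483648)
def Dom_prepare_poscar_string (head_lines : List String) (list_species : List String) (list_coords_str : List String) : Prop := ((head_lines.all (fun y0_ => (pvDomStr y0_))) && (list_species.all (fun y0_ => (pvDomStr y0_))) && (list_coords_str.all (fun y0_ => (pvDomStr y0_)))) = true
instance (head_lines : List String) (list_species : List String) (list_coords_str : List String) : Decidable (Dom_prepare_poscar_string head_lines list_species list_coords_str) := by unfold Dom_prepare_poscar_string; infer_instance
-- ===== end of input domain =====

-- B replaces A's state-machine run-length loop by a divide-and-conquer encoding (alternative algorithm);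
-- A mutates head_lines in place, the equivalence proved here is about the RETURN value only.

-- ===== PORT A =====
-- one loop step of A's state machine over (counter, element, count)
def pvStepA (s : List (String × Int) × String × Int) (species_str : String) : List (String × Int) × String × Int :=
  if s.2.1 == "" then (s.1, species_str, s.2.2 + 1)
  else if species_str == s.2.1 then (s.1, s.2.1, s.2.2 + 1)
  else (s.1 ++ [(s.2.1, s.2.2)], species_str, 1)

-- A's post-loop flush: `if element != "": counter.append((element, count))`
def pvFinA (st : List (String × Int) × String × Int) : List (String × Int) :=
  if st.2.1 != "" then st.1 ++ [(st.2.1, st.2.2)] else st.1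

def prepare_poscar_string (head_lines : List String) (list_species : List String) (list_coords_str : List String) : String :=
  PySem.Str.join "\n"
    (head_lines
      ++ [PySem.Str.join " " ((pvFinA (list_species.foldl pvStepA ([], "", 0))).map (fun p => p.1)),
          PySem.Str.join " " ((pvFinA (list_species.foldl pvStepA ([], "", 0))).map (fun p => PySem.Int.toStr p.2)),
          "Direct"]
      ++ list_coords_str)

-- ===== PORT B =====
-- _merge: combine the encodings of two adjacent segments; left[-1]/right[0] via getLast?/head?
-- (the `_ , _` arm is unreachable in Source B: _merge is only called on nonempty halves)
def pvMerge (l r : List (String × Int)) : List (String × Int) :=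
  match l.getLast?, r.head? with
  | some (y, c), some (z, d) =>
      if y == z then l.dropLast ++ [(y, c + d)] ++ r.tail else l ++ r
  | _, _ => l ++ r

-- _rle: divide-and-conquer run-length encoding
def pvRleDC (seg : List String) : List (String × Int) :=
  if h : seg.length ≤ 1 then seg.map (fun s => (s, 1))
  else pvMerge (pvRleDC (seg.take (seg.length / 2))) (pvRleDC (seg.drop (seg.length / 2)))
termination_by seg.length
decreasing_by
  · simp only [List.length_take]; omega
  · simp only [List.length_drop]; omega

def prepare_poscar_string_alt (head_lines : List String) (list_species : List String) (list_coords_str : List String) : String :=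
  PySem.Str.join "\n"
    (head_lines
      ++ [PySem.Str.join " " ((pvRleDC list_species).map (fun p => p.1)),
          PySem.Str.join " " ((pvRleDC list_species).map (fun p => PySem.Int.toStr p.2)),
          "Direct"]
      ++ list_coords_str)

-- ===== PRECONDITION & SPEC =====
-- Pre_ excludes species lists containing the empty string: an empty species name is meaningless
-- for a POSCAR species block and no behaviour is specified for it ("" is also A's
-- not-yet-started sentinel, so on such lists A's value comes from leftover loop state, e.g. a
-- count carried across a dropped "" run); B counts "" as an ordinary value — an unspecifiable corner.
def Pre_prepare_poscar_string (head_lines : List String) (list_species : List String) (list_coords_str : List String) : Prop := "" ∉ list_species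
instance (head_lines : List String) (list_species : List String) (list_coords_str : List String) : Decidable (Pre_prepare_poscar_string head_lines list_species list_coords_str) := by unfold Pre_prepare_poscar_string; infer_instance

def pvWitness_prepare_poscar_string : List String × List String × List String := (["title", "1.0"], ["Mg", "Mg", "O"], ["0 0 0", "0.5 0.5 0.5", "0.25 0.25 0.25"])

def Spec_prepare_poscar_string (head_lines : List String) (list_species : List String) (list_coords_str : List String) (out : String) : Prop := out = prepare_poscar_string_alt head_lines list_species list_coords_str
instance (head_lines : List String) (list_species : List String) (list_coords_str : List String) (out : String) : Decidable (Spec_prepare_poscar_string head_lines list_species list_coords_str out) := by unfold Spec_prepare_poscar_string; infer_instance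

-- ===== CLAIM (what is proved, stated in full; the proofs are below) =====
def Claim_equal_prepare_poscar_string : Prop := ∀ (head_lines : List String) (list_species : List String) (list_coords_str : List String), Dom_prepare_poscar_string head_lines list_species list_coords_str → Pre_prepare_poscar_string head_lines list_species list_coords_str → Spec_prepare_poscar_string head_lines list_species list_coords_str (prepare_poscar_string head_lines list_species list_coords_str)

-- ===== LEMMAS AND PROOFS =====

-- canonical front-combining run-length encoding, bridge between the two ports
def pvStepC (a : String) (r : List (String × Int)) : List (String × Int) :=
  match r with
  | [] => [(a, 1)]
  | (y, c) :: rest => if a == y then (y, c + 1) :: rest else (a, 1) :: (y, c) :: rest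

def pvRleC : List String → List (String × Int)
  | [] => []
  | x :: xs => pvStepC x (pvRleC xs)

def pvCombine : List (String × Int) → List (String × Int) → List (String × Int)
  | [], r => r
  | [(y, c)], r =>
      match r with
      | [] => [(y, c)]
      | (z, d) :: rtl => if y == z then (y, c + d) :: rtl else (y, c) :: (z, d) :: rtl
  | p :: q :: ps, r => p :: pvCombine (q :: ps) r

theorem pvCombine_nil : ∀ (l : List (String × Int)), pvCombine l [] = l := by
  intro l
  induction l with
  | nil => rfl
  | cons p ps ih =>
      cases ps with
      | nil => rcases p with ⟨y, c⟩; rfl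
      | cons q qs => simp [pvCombine, ih]

theorem pvStep_combine (a : String) (l r : List (String × Int)) :
    pvStepC a (pvCombine l r) = pvCombine (pvStepC a l) r := by
  match l with
  | [] =>
      rcases r with _ | ⟨⟨z, d⟩, rtl⟩
      · rfl
      · simp only [pvCombine, pvStepC]
        by_cases h : a = z
        · subst h; simp [pvCombine]; ring
        · simp [pvCombine, h, Ne.symm h]
  | [(y, c)] =>
      rcases r with _ | ⟨⟨z, d⟩, rtl⟩
      · simp [pvCombine, pvStepC]
        by_cases h : a = y
        · subst h; simp [pvCombine]
        · simp [pvCombine, h]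
      · simp only [pvCombine, pvStepC]
        by_cases hyz : y = z
        · subst hyz
          simp only [beq_self_eq_true, if_true]
          by_cases h : a = y
          · subst h; simp [pvStepC, pvCombine]; ring
          · simp [pvStepC, pvCombine, h]
        · simp only [beq_iff_eq, hyz, if_false]
          by_cases h : a = y
          · subst h; simp [pvStepC, pvCombine, hyz]
          · simp [pvStepC, pvCombine, h, hyz]
  | p :: q :: ps =>
      rcases p with ⟨y, c⟩
      simp only [pvCombine, pvStepC]
      by_cases h : a = y
      · subst h; simp [pvCombine]
      · simp [pvCombine, h]

theorem pvStepC_eq_combine_one (a : String) (r : List (String × Int)) :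
    pvStepC a r = pvCombine [(a, 1)] r := by
  have := pvStep_combine a [] r
  simpa [pvCombine, pvStepC] using this

theorem pvCombine_step_eq (e : String) (c : Int) (r : List (String × Int)) :
    pvCombine [(e, c)] (pvStepC e r) = pvCombine [(e, c + 1)] r := by
  rcases r with _ | ⟨⟨z, d⟩, rtl⟩
  · simp [pvStepC, pvCombine]
  · by_cases h : e = z
    · subst h; simp [pvStepC, pvCombine]; ring
    · simp [pvStepC, pvCombine, h]

theorem pvCombine_step_ne (e : String) (c : Int) (y : String) (r : List (String × Int))
    (h : y ≠ e) :
    pvCombine [(e, c)] (pvStepC y r) = (e, c) :: pvCombine [(y, 1)] r := by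
  rcases r with _ | ⟨⟨z, d⟩, rtl⟩
  · simp [pvStepC, pvCombine, Ne.symm h]
  · by_cases hyz : y = z
    · subst hyz; simp [pvStepC, pvCombine, Ne.symm h]; ring
    · simp [pvStepC, pvCombine, Ne.symm h, hyz]

-- A's loop, started in state (counter, e, c) with e ≠ "", ends as counter ++ combine [(e,c)] (rleC xs)
theorem pvFoldA_spec : ∀ (xs : List String) (counter : List (String × Int)) (e : String) (c : Int),
    e ≠ "" → "" ∉ xs →
    pvFinA (List.foldl pvStepA (counter, e, c) xs)
      = counter ++ pvCombine [(e, c)] (pvRleC xs) := by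
  intro xs
  induction xs with
  | nil =>
      intro counter e c he _
      simp [pvFinA, pvRleC, pvCombine, he]
  | cons y ys ih =>
      intro counter e c he hmem
      have hy : y ≠ "" := fun h => hmem (h ▸ List.mem_cons_self)
      have hmem' : "" ∉ ys := fun h => hmem (List.mem_cons_of_mem _ h)
      by_cases hye : y = e
      · subst hye
        have hstep : pvStepA (counter, y, c) y = (counter, y, c + 1) := by
          simp [pvStepA, he]
        rw [List.foldl_cons, hstep, ih counter y (c + 1) he hmem']
        simp only [pvRleC, pvCombine_step_eq]
      · have hstep : pvStepA (counter, e, c) y = (counter ++ [(e, c)], y, 1) := by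
          simp [pvStepA, he, hye]
        rw [List.foldl_cons, hstep, ih (counter ++ [(e, c)]) y 1 hy hmem']
        simp only [pvRleC, pvCombine_step_ne e c y _ hye, List.append_assoc, List.singleton_append]

theorem pvRleC_ne_nil (x : String) (xs : List String) : pvRleC (x :: xs) ≠ [] := by
  simp only [pvRleC, pvStepC]
  rcases pvRleC xs with _ | ⟨⟨y, c⟩, rest⟩
  · simp
  · by_cases h : x = y <;> simp [h]

theorem pvMerge_eq_combine : ∀ (l r : List (String × Int)), l ≠ [] → pvMerge l r = pvCombine l r := by
  intro l
  induction l with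
  | nil => intro r h; exact absurd rfl h
  | cons p ps ih =>
      intro r _
      rcases p with ⟨y, c⟩
      cases ps with
      | nil =>
          rcases r with _ | ⟨⟨z, d⟩, rtl⟩
          · simp [pvMerge, pvCombine]
          · by_cases h : y = z
            · subst h; simp [pvMerge, pvCombine]
            · simp [pvMerge, pvCombine, h]
      | cons q qs =>
          have ihq := ih r (by simp)
          rcases r with _ | ⟨⟨z, d⟩, rtl⟩
          · simp [pvMerge, pvCombine_nil] at ihq ⊢
          · simp only [pvMerge, List.getLast?_cons_cons, List.head?_cons] at ihq ⊢
            rcases hlast : (q :: qs).getLast? with _ | ⟨⟨w, e⟩⟩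
            · simp [List.getLast?_eq_none_iff] at hlast
            · rw [hlast] at ihq
              by_cases h : w = z
              · subst h
                simp only [beq_self_eq_true, if_true] at ihq ⊢
                simp [pvCombine, List.dropLast_cons_of_ne_nil, ← ihq]
              · simp only [beq_iff_eq, h, if_false] at ihq ⊢
                simp [pvCombine, ← ihq]

theorem pvRleC_append (as bs : List String) :
    pvRleC (as ++ bs) = pvCombine (pvRleC as) (pvRleC bs) := by
  induction as with
  | nil => simp [pvRleC, pvCombine]
  | cons a t ih => simp only [List.cons_append, pvRleC, ih, pvStep_combine]

theorem pvRleDC_eq_rleC : ∀ (seg : List String), pvRleDC seg = pvRleC seg := by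
  intro seg
  induction seg using pvRleDC.induct with
  | case1 seg h =>
      rw [pvRleDC]
      rcases seg with _ | ⟨x, _ | ⟨y, zs⟩⟩
      · simp [pvRleC]
      · simp [pvRleC, pvStepC]
      · simp at h
  | case2 seg h ih1 ih2 =>
      rw [pvRleDC]
      simp only [h, dite_false, ih1, ih2]
      rcases htk' : seg.take (seg.length / 2) with _ | ⟨x, xs⟩
      · exfalso
        have h0 : (seg.take (seg.length / 2)).length = 0 := by rw [htk']; rfl
        rw [List.length_take] at h0
        omega
      · rw [pvMerge_eq_combine _ _ (htk' ▸ pvRleC_ne_nil x xs), ← htk',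
          ← pvRleC_append, List.take_append_drop]

theorem pvCounter_eq (xs : List String) (h : "" ∉ xs) :
    pvFinA (List.foldl pvStepA ([], "", 0) xs) = pvRleDC xs := by
  rw [pvRleDC_eq_rleC]
  cases xs with
  | nil => simp [pvFinA, pvRleC]
  | cons x xs' =>
      have hx : x ≠ "" := fun hh => h (hh ▸ List.mem_cons_self)
      have hmem' : "" ∉ xs' := fun hh => h (List.mem_cons_of_mem _ hh)
      have hstep : pvStepA (([] : List (String × Int)), "", 0) x = ([], x, 1) := by
        simp [pvStepA]
      rw [List.foldl_cons, hstep, pvFoldA_spec xs' [] x 1 hx hmem']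
      simp [pvRleC, pvStepC_eq_combine_one]

-- ===== VERDICT (by name: the statement is the Claim_ definition above) =====
theorem prepare_poscar_string_spec : Claim_equal_prepare_poscar_string := by
  intro head_lines list_species list_coords_str _ hPre
  unfold Spec_prepare_poscar_string
  unfold prepare_poscar_string prepare_poscar_string_alt
  rw [pvCounter_eq list_species hPre]
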